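-- pv_equiv track=rewrite | github.com/prione/Karaoke | audio_notes.py | arrangement
-- ===== SOURCE A (Python) =====
-- def arrangement(times, notes):
--
--     # 単発ノードを消す
--     while True:
--         _notes = []
--         count = 0
--         for n in range(len(notes)):
--             if n == 0 or n == len(notes) - 1:
--                 _notes.append(notes[n])
--
--             else:
--                 if notes[n] == notes[n-1] and notes[n] == notes[n+1]:
--                     _notes.append(notes[n])
--
--                 elif notes[n] == notes[n-1]:
--                     _notes.append(notes[n-1])
--
--                 elif notes[n] == notes[n+1]:
--                     _notes.append(notes[n+1])
--
--                 else:
--                     _notes.append(None)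
--                     count += 1
--
--         times = [t for t, c in zip(times, _notes) if c != None]
--         notes = [c for c in _notes if c != None]
--
--         if count == 0:
--             break
--
--     return times, notes
-- ===== SOURCE B (Python) =====
-- def arrangement(times, notes):
--     # One pass: keep index i iff it is an endpoint or equals a neighbour.
--     # (A removal never creates a new singleton, so A's while-loop does at
--     # most one effective pass; the mask over the ORIGINAL neighbours gives
--     # the fixpoint directly.)
--     n = len(notes)
--     keep = [i == 0 or i == n - 1 or notes[i] == notes[i - 1] or notes[i] == notes[i + 1]
--             for i in range(n)]
--     new_times = [t for t, k in zip(times, keep) if k]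
--     new_notes = [c for c, k in zip(notes, keep) if k]
--     return new_times, new_notes
-- ===== Notes on version B (the rewrite author's own statement) =====
-- stated objective: simpler
-- what changed: Replaced A's repeat-until-fixpoint while-loop (re-scanning and rebuilding both lists each round) by a single keep-mask pass over the original indices, justified by the invariant that removing a singleton never creates a new singleton, so A's fixpoint is reached after one effective pass.
import Mathlib
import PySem

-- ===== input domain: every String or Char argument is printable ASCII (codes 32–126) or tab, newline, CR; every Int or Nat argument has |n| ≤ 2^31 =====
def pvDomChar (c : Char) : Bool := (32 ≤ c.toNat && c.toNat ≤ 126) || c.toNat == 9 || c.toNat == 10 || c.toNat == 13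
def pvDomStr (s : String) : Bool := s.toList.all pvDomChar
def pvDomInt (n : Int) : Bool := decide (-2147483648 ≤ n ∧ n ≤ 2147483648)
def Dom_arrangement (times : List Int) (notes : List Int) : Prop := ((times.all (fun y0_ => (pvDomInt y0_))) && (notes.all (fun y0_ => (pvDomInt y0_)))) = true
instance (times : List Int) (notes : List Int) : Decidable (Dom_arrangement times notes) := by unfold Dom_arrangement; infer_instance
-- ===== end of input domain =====

-- B replaces A's repeat-until-fixpoint while-loop by a single keep-mask pass over
-- the original indices (simpler); equal return values on all inputs, proved below.

-- ===== PORT A =====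
-- keep-condition on index i: endpoint, or equal to a neighbour.  This is B's
-- comprehension body; it is defined before port A because the chain of lemmas
-- ending in passA_dec (which port A's decreasing_by cites by name) is stated
-- through it.
def kbF (notes : List Int) (i : Nat) : Bool :=
  (i == 0) || (i == notes.length - 1) ||
  (notes.getD i 0 == notes.getD (i - 1) 0) || (notes.getD i 0 == notes.getD (i + 1) 0)

-- one round of A's while-loop body: builds _notes (Python None = none) and count
def passA (notes : List Int) : List (Option Int) × Int :=
  (PySem.List.pyRange 0 (notes.length : Int) 1).foldl
    (fun st n =>
      if n = 0 ∨ n = (notes.length : Int) - 1 then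
        (st.1 ++ [some (PySem.List.pyGetD notes n 0)], st.2)
      else if PySem.List.pyGetD notes n 0 = PySem.List.pyGetD notes (n - 1) 0 ∧
              PySem.List.pyGetD notes n 0 = PySem.List.pyGetD notes (n + 1) 0 then
        (st.1 ++ [some (PySem.List.pyGetD notes n 0)], st.2)
      else if PySem.List.pyGetD notes n 0 = PySem.List.pyGetD notes (n - 1) 0 then
        (st.1 ++ [some (PySem.List.pyGetD notes (n - 1) 0)], st.2)
      else if PySem.List.pyGetD notes n 0 = PySem.List.pyGetD notes (n + 1) 0 then
        (st.1 ++ [some (PySem.List.pyGetD notes (n + 1) 0)], st.2)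
      else (st.1 ++ [none], st.2 + 1))
    ([], 0)

-- characterisation of one fold step of passA (n = the loop variable, in range)
theorem stepA_eq (notes : List Int) (A : List (Option Int)) (c : Int) (m : Nat) (hm : m < notes.length) :
    (if (m : Int) = 0 ∨ (m : Int) = (notes.length : Int) - 1 then
        (A ++ [some (PySem.List.pyGetD notes (m : Int) 0)], c)
      else if PySem.List.pyGetD notes (m : Int) 0 = PySem.List.pyGetD notes ((m : Int) - 1) 0 ∧
              PySem.List.pyGetD notes (m : Int) 0 = PySem.List.pyGetD notes ((m : Int) + 1) 0 then
        (A ++ [some (PySem.List.pyGetD notes (m : Int) 0)], c)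
      else if PySem.List.pyGetD notes (m : Int) 0 = PySem.List.pyGetD notes ((m : Int) - 1) 0 then
        (A ++ [some (PySem.List.pyGetD notes ((m : Int) - 1) 0)], c)
      else if PySem.List.pyGetD notes (m : Int) 0 = PySem.List.pyGetD notes ((m : Int) + 1) 0 then
        (A ++ [some (PySem.List.pyGetD notes ((m : Int) + 1) 0)], c)
      else (A ++ [none], c + 1))
    = (A ++ [if kbF notes m then some (notes.getD m 0) else none],
       c + if kbF notes m then 0 else 1) := by
  have hget : PySem.List.pyGetD notes (m : Int) 0 = notes[m]?.getD 0 := by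
    rw [PySem.List.pyGetD_natCast]; rfl
  have hnext : PySem.List.pyGetD notes ((m : Int) + 1) 0 = notes[m + 1]?.getD 0 := by
    have h : ((m : Int) + 1) = ((m + 1 : Nat) : Int) := by push_cast; ring
    rw [h, PySem.List.pyGetD_natCast]; rfl
  by_cases hm0 : m = 0
  · subst hm0
    simp [kbF, PySem.List.pyGetD_zero, List.getD]
  · have hprev : PySem.List.pyGetD notes ((m : Int) - 1) 0 = notes[m - 1]?.getD 0 := by
      have h : ((m : Int) - 1) = ((m - 1 : Nat) : Int) := by omega
      rw [h, PySem.List.pyGetD_natCast]; rfl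
    by_cases hl : m = notes.length - 1
    · have h : (m : Int) = (notes.length : Int) - 1 := by omega
      rw [if_pos (Or.inr h), hget]
      simp [kbF, hl, List.getD]
    · have hc1 : ¬ ((m : Int) = 0 ∨ (m : Int) = (notes.length : Int) - 1) := by omega
      rw [if_neg hc1, hget, hprev, hnext]
      by_cases h1 : notes[m]?.getD 0 = notes[m - 1]?.getD 0 <;>
        by_cases h2 : notes[m]?.getD 0 = notes[m + 1]?.getD 0 <;>
          (simp [kbF, List.getD, hm0, hl, h1, h2]; try tauto)

-- characterisation of one round, needed (via passA_dec) for port A's termination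
theorem passA_aux (notes : List Int) : ∀ m : Nat, m ≤ notes.length →
    (PySem.List.pyRange 0 (m : Int) 1).foldl
      (fun st n =>
        if n = 0 ∨ n = (notes.length : Int) - 1 then
          (st.1 ++ [some (PySem.List.pyGetD notes n 0)], st.2)
        else if PySem.List.pyGetD notes n 0 = PySem.List.pyGetD notes (n - 1) 0 ∧
                PySem.List.pyGetD notes n 0 = PySem.List.pyGetD notes (n + 1) 0 then
          (st.1 ++ [some (PySem.List.pyGetD notes n 0)], st.2)
        else if PySem.List.pyGetD notes n 0 = PySem.List.pyGetD notes (n - 1) 0 then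
          (st.1 ++ [some (PySem.List.pyGetD notes (n - 1) 0)], st.2)
        else if PySem.List.pyGetD notes n 0 = PySem.List.pyGetD notes (n + 1) 0 then
          (st.1 ++ [some (PySem.List.pyGetD notes (n + 1) 0)], st.2)
        else (st.1 ++ [none], st.2 + 1))
      ([], 0)
    = ((List.range m).map (fun i => if kbF notes i then some (notes.getD i 0) else none),
       ((((List.range m).filter (fun i => !kbF notes i)).length : Nat) : Int)) := by
  intro m hm
  induction m with
  | zero => rw [PySem.List.pyRange_one_eq_nil (by omega)]; simp
  | succ k ih =>
      have hk : k < notes.length := by omega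
      have hsplit : PySem.List.pyRange 0 ((k + 1 : Nat) : Int) 1
          = PySem.List.pyRange 0 (k : Int) 1 ++ [(k : Int)] := by
        have : ((k + 1 : Nat) : Int) = (k : Int) + 1 := by push_cast; ring
        rw [this, PySem.List.pyRange_one_succ_right (by omega)]
      rw [hsplit, List.foldl_append, ih (by omega)]
      rw [List.foldl_cons, List.foldl_nil]
      rw [stepA_eq notes _ _ k hk]
      rw [List.range_succ, List.map_append, List.filter_append]
      by_cases hkb : kbF notes k <;> simp [hkb]

theorem passA_eq (notes : List Int) :
    passA notes =
      ((List.range notes.length).map (fun i => if kbF notes i then some (notes.getD i 0) else none),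
       ((((List.range notes.length).filter (fun i => !kbF notes i)).length : Nat) : Int)) :=
  passA_aux notes notes.length le_rfl

-- termination: a round with count ≠ 0 strictly shrinks the notes list
-- (cited by name in port A's decreasing_by)
theorem passA_dec (notes : List Int) (h : ¬ (passA notes).2 = 0) :
    ((((passA notes).1.filter (fun c => c ≠ none)).map (fun c => c.getD 0)).length) < notes.length := by
  rw [passA_eq] at h ⊢
  rw [List.filter_map, List.length_map, List.length_map]
  have hfe : ((List.range notes.length).filter
      ((fun c => decide (c ≠ none)) ∘ (fun i => if kbF notes i then some (notes.getD i 0) else none)))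
      = (List.range notes.length).filter (fun i => kbF notes i) := by
    apply List.filter_congr
    intro i _
    by_cases hkb : kbF notes i <;> simp [hkb]
  rw [hfe]
  have hsum := List.length_eq_length_filter_add (l := List.range notes.length) (fun i => kbF notes i)
  have hne : ((List.range notes.length).filter (fun i => !kbF notes i)).length ≠ 0 := by
    intro h0; apply h; rw [h0]; rfl
  have : ((List.range notes.length).filter (fun i => !(fun i => kbF notes i) i)).length
      = ((List.range notes.length).filter (fun i => !kbF notes i)).length := rfl
  simp only [List.length_range] at hsum
  omega

-- every interior element of the kept list equals a neighbour: the kept list is stable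

-- port of A: the while-loop is the recursion, one call per round
def arrangement (times : List Int) (notes : List Int) : List Int × List Int :=
  let st := passA notes
  let times' := ((times.zip st.1).filter (fun p => p.2 ≠ none)).map (fun p => p.1)
  let notes' := (st.1.filter (fun c => c ≠ none)).map (fun c => c.getD 0)
  if h : st.2 = 0 then (times', notes') else arrangement times' notes'
termination_by notes.length
decreasing_by exact passA_dec notes h

-- ===== PORT B =====
def arrangement_alt (times : List Int) (notes : List Int) : List Int × List Int :=
  let keep := (List.range notes.length).map (kbF notes)
  (((times.zip keep).filter (fun p => p.2)).map (fun p => p.1),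
   ((notes.zip keep).filter (fun p => p.2)).map (fun p => p.1))

-- ===== PRECONDITION & SPEC =====
def Spec_arrangement (times : List Int) (notes : List Int) (out : List Int × List Int) : Prop := out = arrangement_alt times notes
instance (times : List Int) (notes : List Int) (out : List Int × List Int) : Decidable (Spec_arrangement times notes out) := by unfold Spec_arrangement; infer_instance

-- ===== CLAIM (what is proved, stated in full; the proofs are below) =====
def Claim_equal_arrangement : Prop := ∀ (times : List Int) (notes : List Int), Dom_arrangement times notes → Spec_arrangement times notes (arrangement times notes)

-- ===== LEMMAS AND PROOFS =====

-- zip against a comprehension over range, as a map over indices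
theorem zip_map_range {β : Type} (t : List Int) (n : Nat) (f : Nat → β) :
    t.zip ((List.range n).map f)
      = (List.range (min t.length n)).map (fun i => (t.getD i 0, f i)) := by
  apply List.ext_getElem
  · simp
  · intro i h1 h2
    simp only [List.getElem_zip, List.getElem_map, List.getElem_range]
    have hlen : i < min t.length n := by simpa using h1
    rw [List.getD_eq_getElem _ _ (by omega)]

-- A's first-round outputs, in selected-index normal form

-- A's first-round time selection, in selected-index normal form
theorem selA_norm (t : List Int) (notes : List Int) :
    ((t.zip ((List.range notes.length).map
        (fun i => if kbF notes i then some (notes.getD i 0) else none))).filter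
          (fun p => p.2 ≠ none)).map (fun p => p.1)
    = ((List.range (min t.length notes.length)).filter (fun i => kbF notes i)).map
        (fun i => t.getD i 0) := by
  rw [zip_map_range, List.filter_map]
  have hfe : (List.range (min t.length notes.length)).filter
      ((fun (p : Int × Option Int) => decide (p.2 ≠ none)) ∘
        (fun i => (t.getD i 0, if kbF notes i then some (notes.getD i 0) else none)))
      = (List.range (min t.length notes.length)).filter (fun i => kbF notes i) := by
    apply List.filter_congr
    intro i _
    by_cases hkb : kbF notes i <;> simp [hkb]
  rw [hfe, List.map_map]
  rfl

-- B's outputs, in the same normal form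

-- B's selections, in the same normal form
theorem selB_norm (t : List Int) (notes : List Int) :
    ((t.zip ((List.range notes.length).map (kbF notes))).filter
        (fun p => p.2)).map (fun p => p.1)
    = ((List.range (min t.length notes.length)).filter (fun i => kbF notes i)).map
        (fun i => t.getD i 0) := by
  rw [zip_map_range, List.filter_map]
  have hfe : (List.range (min t.length notes.length)).filter
      ((fun (p : Int × Bool) => p.2) ∘ (fun i => (t.getD i 0, kbF notes i)))
      = (List.range (min t.length notes.length)).filter (fun i => kbF notes i) := by
    apply List.filter_congr
    intro i _
    rfl
  rw [hfe, List.map_map]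
  rfl

-- A's new notes list, in the same normal form

-- A's first-round new notes list, in the same normal form
theorem notesA_norm (notes : List Int) :
    (((List.range notes.length).map
        (fun i => if kbF notes i then some (notes.getD i 0) else none)).filter
          (fun c => c ≠ none)).map (fun c => c.getD 0)
    = ((List.range notes.length).filter (fun i => kbF notes i)).map
        (fun i => notes.getD i 0) := by
  rw [List.filter_map]
  have hfe : (List.range notes.length).filter
      ((fun (c : Option Int) => decide (c ≠ none)) ∘
        (fun i => if kbF notes i then some (notes.getD i 0) else none))
      = (List.range notes.length).filter (fun i => kbF notes i) := by
    apply List.filter_congr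
    intro i _
    by_cases hkb : kbF notes i <;> simp [hkb]
  rw [hfe, List.map_map]
  apply List.map_congr_left
  intro i hi
  have hkb : kbF notes i = true := (List.mem_filter.mp hi).2
  simp [hkb]

-- key invariant: every element of the kept list is an endpoint or equals a
-- neighbour (a removal never creates a new singleton), so the kept list is stable
theorem kb_all (notes : List Int) (p : Nat)
    (hp : p < (((List.range notes.length).filter (fun i => kbF notes i)).map (fun i => notes.getD i 0)).length) :
    kbF (((List.range notes.length).filter (fun i => kbF notes i)).map (fun i => notes.getD i 0)) p = true := by
  set K := (List.range notes.length).filter (fun i => kbF notes i) with hKdef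
  set N1 := K.map (fun i => notes.getD i 0) with hN1def
  have hm : N1.length = K.length := by rw [hN1def, List.length_map]
  by_cases hp0 : p = 0
  · simp [kbF, hp0]
  by_cases hpl : p = N1.length - 1
  · simp [kbF, hpl]
  have hpK : p < K.length := by omega
  have hKpair : K.Pairwise (· < ·) :=
    List.Pairwise.sublist List.filter_sublist List.pairwise_lt_range
  have hmono := List.pairwise_iff_getElem.mp hKpair
  have hmemK : ∀ j, j ∈ K ↔ j < notes.length ∧ kbF notes j = true := by
    intro j; rw [hKdef, List.mem_filter, List.mem_range]
  set i := K[p] with hidef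
  have hiK : i ∈ K := List.getElem_mem hpK
  have hin : i < notes.length ∧ kbF notes i = true := (hmemK i).mp hiK
  have hi1 : 1 ≤ i := by
    have h0 := hmono 0 p (by omega) hpK (Nat.pos_of_ne_zero hp0)  -- K[0] < K[p]
    omega
  have hiu : i + 1 < notes.length := by
    have hlast := hmono p (K.length - 1) hpK (by omega) (by omega)
    have : K[K.length - 1] ∈ K := List.getElem_mem (by omega)
    have := ((hmemK _).mp this).1
    omega
  -- extract the neighbour equality from kbF notes i
  have hnb : notes.getD i 0 = notes.getD (i - 1) 0 ∨ notes.getD i 0 = notes.getD (i + 1) 0 := by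
    have := hin.2
    simp only [kbF, Bool.or_eq_true, beq_iff_eq] at this
    rcases this with ((h|h)|h)|h
    · omega
    · omega
    · exact Or.inl h
    · exact Or.inr h
  -- getD of N1 through K
  have hN1get : ∀ q (hq : q < K.length), N1.getD q 0 = notes.getD K[q] 0 := by
    intro q hq
    rw [hN1def, List.getD_eq_getElem _ _ (by rw [List.length_map]; exact hq), List.getElem_map]
  rcases hnb with h | h
  · -- previous neighbour: K[p-1] = i - 1
    have hkbprev : kbF notes (i - 1) = true := by
      have hsucc : i - 1 + 1 = i := by omega
      simp only [kbF, Bool.or_eq_true, beq_iff_eq, hsucc]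
      exact Or.inr h.symm
    have hmem : (i - 1) ∈ K := (hmemK _).mpr ⟨by have h1 := hin.1; omega, hkbprev⟩
    obtain ⟨q, hq, hKq⟩ := List.mem_iff_getElem.mp hmem
    have hqp : q < p := by
      by_contra hc
      rcases Nat.lt_or_ge p q with h' | h'
      · have := hmono p q hpK hq h'; omega
      · have hqe : q = p := by omega
        subst hqe
        omega
    have hq_eq : q = p - 1 := by
      by_contra hc
      have hqlt : q < p - 1 := by omega
      have := hmono q (p - 1) hq (by omega) hqlt
      have := hmono (p - 1) p (by omega) hpK (by omega)
      omega
    have hKpm : K[p - 1]'(by omega) = i - 1 := by subst hq_eq; exact hKq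
    have : N1.getD p 0 = N1.getD (p - 1) 0 := by
      rw [hN1get p hpK, hN1get (p - 1) (by omega), hKpm, ← hidef, h]
    simp only [kbF, Bool.or_eq_true, beq_iff_eq]
    exact Or.inl (Or.inr this)
  · -- next neighbour: K[p+1] = i + 1
    have hkbnext : kbF notes (i + 1) = true := by
      have hsucc : i + 1 - 1 = i := by omega
      simp only [kbF, Bool.or_eq_true, beq_iff_eq, hsucc]
      exact Or.inl (Or.inr h.symm)
    have hmem : (i + 1) ∈ K := (hmemK _).mpr ⟨by have h1 := hin.1; omega, hkbnext⟩
    obtain ⟨q, hq, hKq⟩ := List.mem_iff_getElem.mp hmem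
    have hqp : p < q := by
      by_contra hc
      rcases Nat.lt_or_ge q p with h' | h'
      · have := hmono q p hq hpK h'; omega
      · have hqe : q = p := by omega
        subst hqe
        omega
    have hq_eq : q = p + 1 := by
      by_contra hc
      have hqgt : p + 1 < q := by omega
      have := hmono (p + 1) q (by omega) hq hqgt
      have := hmono p (p + 1) hpK (by omega) (by omega)
      omega
    have hKpm : K[p + 1]'(by omega) = i + 1 := by subst hq_eq; exact hKq
    have : N1.getD p 0 = N1.getD (p + 1) 0 := by
      rw [hN1get p hpK, hN1get (p + 1) (by omega), hKpm, ← hidef, h]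
    simp only [kbF, Bool.or_eq_true, beq_iff_eq]
    exact Or.inr this

theorem map_getD_range (l : List Int) :
    (List.range l.length).map (fun i => some (l.getD i 0)) = l.map some := by
  apply List.ext_getElem
  · simp
  · intro i h1 h2
    have hi : i < l.length := by simpa using h2
    simp only [List.getElem_map, List.getElem_range]
    rw [List.getD_eq_getElem _ _ hi]

-- on a stable list, A's second round keeps everything…
theorem stable_mask (notes : List Int) :
    (List.range ((((List.range notes.length).filter (fun i => kbF notes i)).map
        (fun i => notes.getD i 0)).length)).map
      (fun p => if kbF (((List.range notes.length).filter (fun i => kbF notes i)).map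
          (fun i => notes.getD i 0)) p
        then some ((((List.range notes.length).filter (fun i => kbF notes i)).map
          (fun i => notes.getD i 0)).getD p 0) else none)
    = (((List.range notes.length).filter (fun i => kbF notes i)).map
        (fun i => notes.getD i 0)).map some := by
  rw [← map_getD_range]
  apply List.map_congr_left
  intro p hp
  rw [kb_all notes p (List.mem_range.mp hp)]
  simp

-- …and counts no removals
theorem stable_count (notes : List Int) :
    (List.range ((((List.range notes.length).filter (fun i => kbF notes i)).map
        (fun i => notes.getD i 0)).length)).filter
      (fun p => !kbF (((List.range notes.length).filter (fun i => kbF notes i)).map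
          (fun i => notes.getD i 0)) p)
    = [] := by
  apply List.filter_eq_nil_iff.mpr
  intro p hp
  rw [kb_all notes p (List.mem_range.mp hp)]
  simp

-- a second round only zip-truncates times, a no-op when times is already short
theorem zip_some_fst (t l : List Int) (h : t.length ≤ l.length) :
    ((t.zip (l.map some)).filter (fun p => p.2 ≠ none)).map (fun p => p.1) = t := by
  have hall : (t.zip (l.map some)).filter (fun p => p.2 ≠ none) = t.zip (l.map some) := by
    apply List.filter_eq_self.mpr
    intro p hp
    obtain ⟨-, h2⟩ := List.of_mem_zip hp
    obtain ⟨x, -, hx⟩ := List.mem_map.mp h2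
    simp [← hx]
  rw [hall]
  exact List.map_fst_zip (by simpa using h)

theorem map_some_filter (l : List Int) :
    ((l.map some).filter (fun c => c ≠ none)).map (fun c => c.getD 0) = l := by
  rw [List.filter_map]
  simp [List.map_map, Function.comp_def]

-- the selected times list is never longer than the selected notes list
theorem t1_len_le (times notes : List Int) :
    ((((List.range (min times.length notes.length)).filter (fun i => kbF notes i)).map
        (fun i => times.getD i 0)).length)
    ≤ ((((List.range notes.length).filter (fun i => kbF notes i)).map
        (fun i => notes.getD i 0)).length) := by
  rw [List.length_map, List.length_map]
  exact List.Sublist.length_le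
    (List.Sublist.filter _ (List.range_sublist.mpr (Nat.min_le_right _ _)))

-- main equivalence
theorem arr_eq (times notes : List Int) :
    arrangement times notes = arrangement_alt times notes := by
  have halt : arrangement_alt times notes
      = (((List.range (min times.length notes.length)).filter (fun i => kbF notes i)).map
          (fun i => times.getD i 0),
         ((List.range notes.length).filter (fun i => kbF notes i)).map
          (fun i => notes.getD i 0)) := by
    rw [arrangement_alt]
    rw [selB_norm times notes, selB_norm notes notes]
    rw [Nat.min_self]
  rw [arrangement]
  simp only [passA_eq]
  by_cases h : ((((List.range notes.length).filter (fun i => !kbF notes i)).length : Nat) : Int) = 0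
  · rw [dif_pos h, halt]
    rw [selA_norm times notes, notesA_norm notes]
  · rw [dif_neg h]
    rw [selA_norm times notes, notesA_norm notes]
    rw [arrangement]
    simp only [passA_eq]
    rw [stable_mask, stable_count]
    rw [dif_pos (by simp)]
    rw [zip_some_fst _ _ (t1_len_le times notes), map_some_filter, halt]

-- ===== VERDICT (by name: the statement is the Claim_ definition above) =====
theorem arrangement_spec : Claim_equal_arrangement := by
  intro times notes _
  show arrangement times notes = arrangement_alt times notes
  exact arr_eq times notes
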